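-- pv_equiv track=rewrite | github.com/dengguojie/vue-element-admin | auto_schedule/python/platform/classifier/elewise_classifier.py | _get_strict_pattern
-- ===== SOURCE A (Python) =====
-- def _get_strict_pattern(shape1, shape2):
--     def get_axis_type(_a, _b):
--         a_ = -1 if _a < 0 else 2 if _a > 1 else 1
--         b_ = -1 if _b < 0 else 2 if _b > 1 else 1
--         # axis type consists of three binary digits
--         #     No.1: common axis
--         #     No.2: a broadcast to b
--         #     No.3: b broadcast to a
--         # for example: 0b010 means a broadcast b
--         #              0b110 means many be common axis or a broadcast b
--         #              0b111 means many be common axis or a broadcast b or b broadcast to a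
--         d_1 = {
--             (-1, -1): 0b111,
--             (-1, 1): 0b101,
--             (-1, 2): 0b110,
--             (1, -1): 0b110,
--             (1, 1): 0b100,
--             (1, 2): 0b010,
--             (2, -1): 0b101,
--             (2, 1): 0b001,
--             (2, 2): 0b100,
--         }
--         return d_1[(a_, b_)]
--
--     return [get_axis_type(a, b) for a, b in zip(shape1, shape2)]
-- ===== SOURCE B (Python) =====
-- def _get_strict_pattern(shape1, shape2):
--     # Staged computation: three separate passes build the three bit-planes
--     # (common / a->b / b->a) directly from raw dims, then an elementwise sum
--     # combines them.  No bucketization and no lookup table.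
--     pairs = list(zip(shape1, shape2))
--     common = [0 if (0 <= a <= 1 < b) or (0 <= b <= 1 < a) else 4 for a, b in pairs]
--     a_to_b = [2 if a <= 1 and not (0 <= b <= 1) else 0 for a, b in pairs]
--     b_to_a = [1 if b <= 1 and not (0 <= a <= 1) else 0 for a, b in pairs]
--     return [x + y + z for x, y, z in zip(common, a_to_b, b_to_a)]
-- ===== Notes on version B (the rewrite author's own statement) =====
-- stated objective: alternative
-- what changed: Replaced the single-pass bucketize-and-lookup (9-entry dict per element) with three staged passes that each build one bit-plane (common, a-to-b, b-to-a) directly from the raw dims, combined by an elementwise sum.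
import Mathlib
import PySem

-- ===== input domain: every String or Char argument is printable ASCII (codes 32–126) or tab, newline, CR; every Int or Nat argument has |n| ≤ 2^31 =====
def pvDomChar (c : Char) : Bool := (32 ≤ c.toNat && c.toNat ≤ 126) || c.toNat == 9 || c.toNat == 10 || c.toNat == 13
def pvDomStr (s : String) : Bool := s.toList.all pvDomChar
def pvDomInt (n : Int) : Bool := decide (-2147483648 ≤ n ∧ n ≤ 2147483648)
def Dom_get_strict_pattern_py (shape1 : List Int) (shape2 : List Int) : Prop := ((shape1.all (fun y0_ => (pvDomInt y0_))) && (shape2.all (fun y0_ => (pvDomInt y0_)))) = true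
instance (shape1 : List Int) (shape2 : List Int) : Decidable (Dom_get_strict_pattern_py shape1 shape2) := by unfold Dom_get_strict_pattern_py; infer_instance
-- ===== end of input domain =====

-- B builds the three bit-planes in three staged passes from the raw dims and sums them
-- elementwise, instead of A's per-element bucketization + 9-entry table lookup; objective: alternative.

-- ===== PORT A =====
-- A's inner helper: bucketize both dims, build the 9-entry dict, look the pair up.
-- All 9 (a_,b_) keys are present, so the KeyError branch of d_1[...] is
-- unreachable; the Option.getD 0 default is never taken.
def pvAxisTypeA (a b : Int) : Int :=
  let a_ : Int := if a < 0 then -1 else if a > 1 then 2 else 1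
  let b_ : Int := if b < 0 then -1 else if b > 1 then 2 else 1
  let d1 : PySem.Dict (Int × Int) Int := PySem.Dict.ofList
    [((-1, -1), 0b111), ((-1, 1), 0b101), ((-1, 2), 0b110),
     ((1, -1), 0b110), ((1, 1), 0b100), ((1, 2), 0b010),
     ((2, -1), 0b101), ((2, 1), 0b001), ((2, 2), 0b100)]
  (PySem.Dict.get? d1 (a_, b_)).getD 0

def get_strict_pattern_py (shape1 : List Int) (shape2 : List Int) : List Int :=
  (shape1.zip shape2).map (fun ab => pvAxisTypeA ab.1 ab.2)

-- ===== PORT B =====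
def get_strict_pattern_py_alt (shape1 : List Int) (shape2 : List Int) : List Int :=
  let pairs := shape1.zip shape2
  let common := pairs.map (fun ab =>
    if (0 ≤ ab.1 ∧ ab.1 ≤ 1 ∧ 1 < ab.2) ∨ (0 ≤ ab.2 ∧ ab.2 ≤ 1 ∧ 1 < ab.1) then (0 : Int) else 4)
  let a_to_b := pairs.map (fun ab =>
    if ab.1 ≤ 1 ∧ ¬ (0 ≤ ab.2 ∧ ab.2 ≤ 1) then (2 : Int) else 0)
  let b_to_a := pairs.map (fun ab =>
    if ab.2 ≤ 1 ∧ ¬ (0 ≤ ab.1 ∧ ab.1 ≤ 1) then (1 : Int) else 0)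
  -- zip3 comprehension [x+y+z for x,y,z in zip(...)] ported as nested zipWith
  List.zipWith (· + ·) common (List.zipWith (· + ·) a_to_b b_to_a)

-- ===== PRECONDITION & SPEC =====
def Spec_get_strict_pattern_py (shape1 : List Int) (shape2 : List Int) (out : List Int) : Prop := out = get_strict_pattern_py_alt shape1 shape2
instance (shape1 : List Int) (shape2 : List Int) (out : List Int) : Decidable (Spec_get_strict_pattern_py shape1 shape2 out) := by unfold Spec_get_strict_pattern_py; infer_instance

-- ===== CLAIM (what is proved, stated in full; the proofs are below) =====
def Claim_equal_get_strict_pattern_py : Prop := ∀ (shape1 : List Int) (shape2 : List Int), Dom_get_strict_pattern_py shape1 shape2 → Spec_get_strict_pattern_py shape1 shape2 (get_strict_pattern_py shape1 shape2)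

-- ===== LEMMAS AND PROOFS =====
-- zipWith of two maps over the same list is a map of the combined function
theorem pv_zipWith_map_same {α β γ δ : Type} (g : β → γ → δ) (f1 : α → β) (f2 : α → γ)
    (l : List α) :
    List.zipWith g (l.map f1) (l.map f2) = l.map (fun x => g (f1 x) (f2 x)) := by
  induction l with
  | nil => rfl
  | cons x xs ih => simp [ih]

-- per-element: A's table lookup equals the sum of B's three bits
theorem pvAxisType_sum (a b : Int) :
    pvAxisTypeA a b =
      (if (0 ≤ a ∧ a ≤ 1 ∧ 1 < b) ∨ (0 ≤ b ∧ b ≤ 1 ∧ 1 < a) then (0 : Int) else 4)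
      + ((if a ≤ 1 ∧ ¬ (0 ≤ b ∧ b ≤ 1) then (2 : Int) else 0)
        + (if b ≤ 1 ∧ ¬ (0 ≤ a ∧ a ≤ 1) then (1 : Int) else 0)) := by
  unfold pvAxisTypeA
  split_ifs <;> first | rfl | omega

-- ===== VERDICT (by name: the statement is the Claim_ definition above) =====
theorem get_strict_pattern_py_spec : Claim_equal_get_strict_pattern_py := by
  intro shape1 shape2 _
  unfold Spec_get_strict_pattern_py get_strict_pattern_py get_strict_pattern_py_alt
  simp only [pv_zipWith_map_same]
  exact List.map_congr_left (fun ab _ => pvAxisType_sum ab.1 ab.2)
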